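-- pv_equiv track=rewrite | github.com/pythagoreantree/python-Yandex-1 | 3_6_genom_2.py | get_base_pairs
-- ===== SOURCE A (Python) =====
-- def get_base_pairs(genom):
--     d = {}
--     for i in range(len(genom) - 1):
--         first_letter = genom[i:i+1]
--         pair = genom[i:i+2]
--         if first_letter not in d:
--             d[first_letter] = {}
--         if pair not in d[first_letter]:
--             d[first_letter][pair] = 0
--         d[first_letter][pair] += 1
--     return d
-- ===== SOURCE B (Python) =====
-- def get_base_pairs(genom):
--     # Two-pass: flat pair counter first, then group counts by first letter.
--     pairs = [a + b for a, b in zip(genom, genom[1:])]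
--     cnt = {}
--     for p in pairs:
--         cnt[p] = cnt.get(p, 0) + 1
--     return {f: {p: c for p, c in cnt.items() if p[:1] == f}
--             for f in dict.fromkeys(p[:1] for p in pairs)}
-- ===== Notes on version B (the rewrite author's own statement) =====
-- stated objective: alternative
-- what changed: A mutates a nested dict-of-dicts inside one indexed loop with membership checks; B instead builds a flat pair->count dictionary in one pass over zipped adjacent characters and then groups the counts by first letter with comprehensions, relying on dict insertion order.
import Mathlib
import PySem

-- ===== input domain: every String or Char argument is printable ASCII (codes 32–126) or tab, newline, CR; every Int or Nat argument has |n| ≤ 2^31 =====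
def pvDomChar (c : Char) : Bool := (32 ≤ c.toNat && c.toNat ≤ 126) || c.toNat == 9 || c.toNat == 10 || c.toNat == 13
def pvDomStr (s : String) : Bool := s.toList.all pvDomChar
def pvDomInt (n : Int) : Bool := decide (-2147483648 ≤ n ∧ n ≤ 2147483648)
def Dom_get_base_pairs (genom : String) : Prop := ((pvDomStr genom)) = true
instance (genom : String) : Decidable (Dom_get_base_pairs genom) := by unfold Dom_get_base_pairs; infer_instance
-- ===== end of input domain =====

-- B replaces A's single indexed loop that mutates a nested dict-of-dicts by a one-pass flat
-- pair counter followed by a grouping pass by first letter (objective: alternative).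

-- ===== PORT A =====
-- genom[i:i+1] / genom[i:i+2] are ported exactly via PySem.List.slice on the character list;
-- d[first_letter][pair] += 1 is the in-place update of the inner dict, written back with
-- insert (existing key: value overwritten in place, order kept).
def get_base_pairs (genom : String) : List (String × List (String × Int)) :=
  let gl := genom.toList
  let d := (PySem.List.pyRange 0 ((gl.length : Int) - 1) 1).foldl
    (fun (d : PySem.Dict String (PySem.Dict String Int)) i =>
      let first_letter := String.ofList (PySem.List.slice gl (some i) (some (i + 1)))
      let pair := String.ofList (PySem.List.slice gl (some i) (some (i + 2)))
      let d := if d.contains first_letter then d else d.insert first_letter PySem.Dict.empty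
      let inner := d.getD first_letter PySem.Dict.empty
      let inner := if inner.contains pair then inner else inner.insert pair 0
      d.insert first_letter (inner.modify pair 0 (· + 1)))
    PySem.Dict.empty
  d.items.map (fun q => (q.1, q.2.items))

-- ===== PORT B =====
-- pairs = [a+b for a,b in zip(genom, genom[1:])]; cnt[p] = cnt.get(p, 0) + 1 is Dict.modify;
-- dict.fromkeys is PySem.List.dedup; the inner dict comprehension over cnt.items() is the
-- filtered items list (keys are distinct); p[:1] is take 1 on the character list.
def get_base_pairs_alt (genom : String) : List (String × List (String × Int)) :=
  let gl := genom.toList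
  let pairs := (gl.zip gl.tail).map (fun ab => String.ofList [ab.1, ab.2])
  let cnt := pairs.foldl (fun (c : PySem.Dict String Int) p => c.modify p 0 (· + 1)) PySem.Dict.empty
  (PySem.List.dedup (pairs.map (fun p => String.ofList (p.toList.take 1)))).map
    (fun f => (f, cnt.items.filter (fun pc => String.ofList (pc.1.toList.take 1) == f)))

-- ===== PRECONDITION & SPEC =====
def Spec_get_base_pairs (genom : String) (out : List (String × List (String × Int))) : Prop := out = get_base_pairs_alt genom
instance (genom : String) (out : List (String × List (String × Int))) : Decidable (Spec_get_base_pairs genom out) := by unfold Spec_get_base_pairs; infer_instance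

-- ===== CLAIM (what is proved, stated in full; the proofs are below) =====
def Claim_equal_get_base_pairs : Prop := ∀ (genom : String), Dom_get_base_pairs genom → Spec_get_base_pairs genom (get_base_pairs genom)

-- ===== LEMMAS AND PROOFS =====

-- the first letter of a pair, as B extracts it
def pvKey (p : String) : String := String.ofList (p.toList.take 1)

-- the list of adjacent pairs
def pvPairs (gl : List Char) : List String :=
  (gl.zip gl.tail).map (fun ab => String.ofList [ab.1, ab.2])

-- A's nested fold after simplification of its loop step
def pvNest (P : List String) : PySem.Dict String (PySem.Dict String Int) :=
  P.foldl (fun d p => d.modify (pvKey p) PySem.Dict.empty (fun inner => inner.modify p 0 (· + 1)))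
    PySem.Dict.empty

theorem pvKey_pair (a b : Char) : pvKey (String.ofList [a, b]) = String.ofList [a] := by
  simp [pvKey]

theorem map_replace_of_not_contains {κ ν : Type} [BEq κ] (l : List (κ × ν)) (k : κ) (v : ν)
    (h : l.any (fun p => p.1 == k) = false) :
    l.map (fun p => if p.1 == k then (k, v) else p) = l := by
  induction l with
  | nil => rfl
  | cons x xs ih =>
    simp only [List.any_cons, Bool.or_eq_false_iff] at h
    simp [h.1, ih h.2]

theorem insert_insert_self {κ ν : Type} [BEq κ] [LawfulBEq κ] (d : PySem.Dict κ ν) (k : κ) (v w : ν) :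
    (d.insert k v).insert k w = d.insert k w := by
  by_cases h : (d.items.any fun p => p.1 == k) = true
  · have h1 : d.insert k v = ⟨d.items.map (fun p => if p.1 == k then (k, v) else p)⟩ := by
      simp [PySem.Dict.insert, PySem.Dict.contains, h]
    have h2 : ((d.items.map (fun p => if p.1 == k then (k, v) else p)).any fun p => p.1 == k) = true := by
      rw [List.any_map]
      rw [List.any_eq_true] at h ⊢
      obtain ⟨p, hp, hpk⟩ := h
      exact ⟨p, hp, by simp [Function.comp, hpk]⟩
    rw [h1]
    simp only [PySem.Dict.insert, PySem.Dict.contains, h2, h, if_true, List.map_map]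
    congr 1
    apply List.map_congr_left
    intro p _
    by_cases hp : (p.1 == k) = true <;> simp [Function.comp, hp]
  · have h' : (d.items.any fun p => p.1 == k) = false := by simp only [Bool.not_eq_true] at h; exact h
    have h1 : d.insert k v = ⟨d.items ++ [(k, v)]⟩ := by
      simp [PySem.Dict.insert, PySem.Dict.contains, h']
    have h2 : ((d.items ++ [(k, v)]).any fun p => p.1 == k) = true := by simp
    rw [h1]
    simp only [PySem.Dict.insert, PySem.Dict.contains, h2, h', if_true, Bool.false_eq_true,
      if_false, List.map_append, List.map_cons, List.map_nil]
    rw [map_replace_of_not_contains _ _ _ h']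
    simp

theorem getD_not_contains {κ ν : Type} [BEq κ] [LawfulBEq κ] (d : PySem.Dict κ ν) (k : κ) (d0 : ν)
    (h : d.contains k = false) : d.getD k d0 = d0 := by
  rw [PySem.Dict.getD, (PySem.Dict.get?_eq_none_iff_contains d k).2 h]
  rfl

theorem modify_insert_self {κ ν : Type} [BEq κ] [LawfulBEq κ] (d : PySem.Dict κ ν) (k : κ) (v : ν)
    (g : ν → ν) (h : d.contains k = false) :
    (d.insert k v).modify k v g = d.modify k v g := by
  simp only [PySem.Dict.modify, PySem.Dict.getD_insert_self, insert_insert_self,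
    getD_not_contains d k v h]

theorem stepA_eq (d : PySem.Dict String (PySem.Dict String Int)) (f p : String) :
    ((if d.contains f then d else d.insert f PySem.Dict.empty).insert f
      ((if ((if d.contains f then d else d.insert f PySem.Dict.empty).getD f PySem.Dict.empty).contains p
          then (if d.contains f then d else d.insert f PySem.Dict.empty).getD f PySem.Dict.empty
          else ((if d.contains f then d else d.insert f PySem.Dict.empty).getD f PySem.Dict.empty).insert p 0).modify p 0 (· + 1)))
    = d.modify f PySem.Dict.empty (fun inner => inner.modify p 0 (· + 1)) := by
  have key : ∀ (inner : PySem.Dict String Int),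
      (if inner.contains p then inner else inner.insert p 0).modify p 0 (· + 1)
        = inner.modify p 0 (· + 1) := by
    intro inner
    by_cases hp : inner.contains p = true
    · simp [hp]
    · simp only [hp, Bool.false_eq_true, if_false]
      exact modify_insert_self inner p 0 _ (by simpa using hp)
  by_cases hF : d.contains f = true
  · simp only [hF, if_true]
    rw [key (d.getD f PySem.Dict.empty)]
    rfl
  · have hF' : d.contains f = false := by simpa using hF
    simp only [hF', Bool.false_eq_true, if_false, PySem.Dict.getD_insert_self]
    rw [key PySem.Dict.empty]
    have he : (PySem.Dict.empty : PySem.Dict String Int).contains p = false := rfl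
    rw [insert_insert_self]
    show d.insert f (PySem.Dict.empty.modify p 0 (· + 1))
        = d.modify f PySem.Dict.empty (fun inner => inner.modify p 0 (· + 1))
    simp only [PySem.Dict.modify, getD_not_contains d f PySem.Dict.empty hF']

theorem getD_foldl_modify_key {κ ν β : Type} [BEq κ] [LawfulBEq κ] [DecidableEq κ]
    (l : List β) (key : β → κ) (d0 : ν) (g : β → ν → ν) (d : PySem.Dict κ ν) (c : κ) :
    (l.foldl (fun d x => d.modify (key x) d0 (g x)) d).getD c d0
      = (l.filter (fun x => key x == c)).foldl (fun v x => g x v) (d.getD c d0) := by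
  induction l generalizing d with
  | nil => rfl
  | cons x xs ih =>
    simp only [List.foldl_cons, List.filter_cons]
    by_cases hx : (key x == c) = true
    · have hc : c = key x := (eq_of_beq hx).symm
      simp only [hx, if_true, List.foldl_cons, ih]
      rw [PySem.Dict.getD_modify, if_pos hc, hc]
    · have hx' : (key x == c) = false := by simpa using hx
      simp only [hx', Bool.false_eq_true, if_false, ih]
      rw [PySem.Dict.getD_modify, if_neg (fun hh => by simp [hh] at hx')]

theorem items_aux {κ ν : Type} [BEq κ] [LawfulBEq κ] (d0 : ν) :
    ∀ (l : List (κ × ν)), (l.map (fun p => p.1)).Nodup →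
      l = (l.map (fun p => p.1)).map (fun c => (c, (PySem.Dict.mk l : PySem.Dict κ ν).getD c d0)) := by
  intro l
  induction l with
  | nil => intro _; rfl
  | cons x xs ih =>
    intro h
    simp only [List.map_cons, List.nodup_cons] at h
    obtain ⟨hx, hnd⟩ := h
    have h1 : (PySem.Dict.mk (x :: xs) : PySem.Dict κ ν).getD x.1 d0 = x.2 := by
      have : List.find? (fun p => p.1 == x.1) (x :: xs) = some x :=
        List.find?_cons_of_pos (by simp)
      simp [PySem.Dict.getD, PySem.Dict.get?, this]
    have h2 : ∀ c ∈ xs.map (fun p => p.1),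
        (PySem.Dict.mk (x :: xs) : PySem.Dict κ ν).getD c d0
          = (PySem.Dict.mk xs : PySem.Dict κ ν).getD c d0 := by
      intro c hc
      have hne : (x.1 == c) = false := by
        rcases List.mem_map.1 hc with ⟨q, hq, rfl⟩
        have hne' : x.1 ≠ q.1 := fun hh => hx (hh ▸ List.mem_map_of_mem hq)
        simpa using hne'
      have : List.find? (fun p => p.1 == c) (x :: xs)
          = List.find? (fun p => p.1 == c) xs := List.find?_cons_of_neg (by simp [hne])
      simp [PySem.Dict.getD, PySem.Dict.get?, this]
    calc x :: xs
        = x :: (xs.map (fun p => p.1)).map (fun c => (c, (PySem.Dict.mk xs : PySem.Dict κ ν).getD c d0)) := by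
          rw [← ih hnd]
      _ = (x.1, (PySem.Dict.mk (x :: xs) : PySem.Dict κ ν).getD x.1 d0) ::
            (xs.map (fun p => p.1)).map (fun c => (c, (PySem.Dict.mk (x :: xs) : PySem.Dict κ ν).getD c d0)) := by
          rw [h1]
          congr 1
          exact (List.map_congr_left (fun c hc => by rw [h2 c hc])).symm
      _ = ((x :: xs).map (fun p => p.1)).map (fun c => (c, (PySem.Dict.mk (x :: xs) : PySem.Dict κ ν).getD c d0)) := by
          simp

theorem items_eq_map_keys {κ ν : Type} [BEq κ] [LawfulBEq κ] (d : PySem.Dict κ ν) (d0 : ν)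
    (h : d.keys.Nodup) : d.items = d.keys.map (fun c => (c, d.getD c d0)) := by
  obtain ⟨l⟩ := d
  exact items_aux d0 l h

theorem update_filter {α : Type} [BEq α] [LawfulBEq α] (q : α → Bool) (l : List α) :
    ∀ (s : List α), List.filter q (PySem.Set.update s l)
      = PySem.Set.update (List.filter q s) (List.filter q l) := by
  induction l with
  | nil => intro s; rfl
  | cons x xs ih =>
    intro s
    simp only [PySem.Set.update, List.foldl_cons, List.filter_cons] at *
    by_cases hq : q x = true
    · simp only [hq, if_true, List.foldl_cons]
      by_cases hs : x ∈ s
      · have h1 : PySem.Set.add s x = s := by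
          simp [PySem.Set.add, PySem.Set.contains, hs]
        have h2 : PySem.Set.add (s.filter q) x = s.filter q := by
          simp [PySem.Set.add, PySem.Set.contains, List.mem_filter, hs, hq]
        rw [h1, h2, ih]
      · have h1 : PySem.Set.add s x = s ++ [x] := by
          simp [PySem.Set.add, PySem.Set.contains, hs]
        have h2 : PySem.Set.add (s.filter q) x = s.filter q ++ [x] := by
          have : x ∉ s.filter q := fun hh => hs (List.mem_filter.1 hh).1
          simp [PySem.Set.add, PySem.Set.contains, this]
        rw [h1, h2, ih]
        congr 1
        simp [List.filter_append, hq]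
    · have hq' : q x = false := by simpa using hq
      simp only [hq', Bool.false_eq_true, if_false]
      by_cases hs : x ∈ s
      · have h1 : PySem.Set.add s x = s := by
          simp [PySem.Set.add, PySem.Set.contains, hs]
        rw [h1, ih]
      · have h1 : PySem.Set.add s x = s ++ [x] := by
          simp [PySem.Set.add, PySem.Set.contains, hs]
        rw [h1, ih]
        congr 1
        simp [List.filter_append, hq']

theorem dedup_filter {α : Type} [BEq α] [LawfulBEq α] (q : α → Bool) (l : List α) :
    PySem.Set.ofList (List.filter q l) = List.filter q (PySem.Set.ofList l) := by
  have := update_filter q l []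
  simpa [PySem.Set.ofList, PySem.Set.empty, PySem.Set.update] using this.symm

theorem counter_items {κ : Type} [BEq κ] [LawfulBEq κ] [DecidableEq κ] (L : List κ) :
    (PySem.Dict.counter L).items
      = (PySem.Set.ofList L).map (fun p => (p, (List.count p L : Int))) := by
  have hkeys : (PySem.Dict.counter L).keys = PySem.Set.ofList L := by
    rw [PySem.Dict.counter_eq_foldl]
    rw [PySem.Dict.keys_foldl_modify L 0 (fun _ _ v => v + 1) PySem.Dict.empty]
    rfl
  have hnodup : (PySem.Dict.counter L).keys.Nodup := by
    rw [hkeys]; exact PySem.Set.nodup_ofList L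
  rw [items_eq_map_keys (PySem.Dict.counter L) 0 hnodup, hkeys]
  apply List.map_congr_left
  intro c _
  have : (PySem.Dict.counter L).getD c 0 = 0 + (List.count c L : Int) := by
    rw [PySem.Dict.counter_eq_foldl]
    exact PySem.Dict.getD_foldl_modify_add_one L PySem.Dict.empty c
  simp [this]

theorem slices_eq (gl : List Char) :
    (PySem.List.pyRange 0 ((gl.length : Int) - 1) 1).map
      (fun i => (String.ofList (PySem.List.slice gl (some i) (some (i + 1))),
                 String.ofList (PySem.List.slice gl (some i) (some (i + 2)))))
    = (gl.zip gl.tail).map (fun ab => (String.ofList [ab.1], String.ofList [ab.1, ab.2])) := by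
  apply List.ext_getElem
  · simp only [List.length_map, PySem.List.length_pyRange_one, List.length_zip, List.length_tail]
    omega
  · intro j h1 h2
    simp only [List.getElem_map]
    have hlen : j < gl.length - 1 := by
      simp [PySem.List.length_pyRange_one] at h1
      omega
    simp only [PySem.List.getElem_pyRange_one, zero_add]
    have hj1 : j < gl.length := by omega
    have hj2 : j + 1 < gl.length := by omega
    have hs1 : PySem.List.slice gl (some (j : Int)) (some ((j : Int) + 1)) = [gl[j]] := by
      have := PySem.List.slice_natCast_add gl j 1
      simp only [Nat.cast_one] at this
      rw [this, List.drop_eq_getElem_cons hj1]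
      rfl
    have hs2 : PySem.List.slice gl (some (j : Int)) (some ((j : Int) + 2)) = [gl[j], gl[j + 1]] := by
      have := PySem.List.slice_natCast_add gl j 2
      simp only [Nat.cast_ofNat] at this
      rw [this, List.drop_eq_getElem_cons hj1, List.drop_eq_getElem_cons hj2]
      rfl
    rw [hs1, hs2, List.getElem_zip, List.getElem_tail]

theorem A_eq_nest (genom : String) :
    get_base_pairs genom = (pvNest (pvPairs genom.toList)).items.map (fun q => (q.1, q.2.items)) := by
  unfold get_base_pairs pvNest pvPairs
  set gl := genom.toList with hgl
  show List.map (fun q => (q.1, q.2.items))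
      (List.foldl
        (fun (d : PySem.Dict String (PySem.Dict String Int)) (i : Int) =>
          (if d.contains (String.ofList (PySem.List.slice gl (some i) (some (i + 1)))) then d else d.insert (String.ofList (PySem.List.slice gl (some i) (some (i + 1)))) PySem.Dict.empty).insert (String.ofList (PySem.List.slice gl (some i) (some (i + 1)))) ((if ((if d.contains (String.ofList (PySem.List.slice gl (some i) (some (i + 1)))) then d else d.insert (String.ofList (PySem.List.slice gl (some i) (some (i + 1)))) PySem.Dict.empty).getD (String.ofList (PySem.List.slice gl (some i) (some (i + 1)))) PySem.Dict.empty).contains (String.ofList (PySem.List.slice gl (some i) (some (i + 2)))) then ((if d.contains (String.ofList (PySem.List.slice gl (some i) (some (i + 1)))) then d else d.insert (String.ofList (PySem.List.slice gl (some i) (some (i + 1)))) PySem.Dict.empty).getD (String.ofList (PySem.List.slice gl (some i) (some (i + 1)))) PySem.Dict.empty) else ((if d.contains (String.ofList (PySem.List.slice gl (some i) (some (i + 1)))) then d else d.insert (String.ofList (PySem.List.slice gl (some i) (some (i + 1)))) PySem.Dict.empty).getD (String.ofList (PySem.List.slice gl (some i) (some (i + 1)))) PySem.Dict.empty).insert (String.ofList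 (PySem.List.slice gl (some i) (some (i + 2)))) 0).modify (String.ofList (PySem.List.slice gl (some i) (some (i + 2)))) 0 (· + 1)))
        PySem.Dict.empty (PySem.List.pyRange 0 ((gl.length : Int) - 1) 1)).items
    = List.map (fun q => (q.1, q.2.items))
        (List.foldl (fun d p => d.modify (pvKey p) PySem.Dict.empty (fun inner => inner.modify p 0 (· + 1)))
          PySem.Dict.empty (List.map (fun ab => String.ofList [ab.1, ab.2]) (gl.zip gl.tail))).items
  have h1 : (fun (d : PySem.Dict String (PySem.Dict String Int)) (i : Int) =>
      (if d.contains (String.ofList (PySem.List.slice gl (some i) (some (i + 1)))) then d else d.insert (String.ofList (PySem.List.slice gl (some i) (some (i + 1)))) PySem.Dict.empty).insert (String.ofList (PySem.List.slice gl (some i) (some (i + 1)))) ((if ((if d.contains (String.ofList (PySem.List.slice gl (some i) (some (i + 1)))) then d else d.insert (String.ofList (PySem.List.slice gl (some i) (some (i + 1)))) PySem.Dict.empty).getD (String.ofList (PySem.List.slice gl (some i) (some (i + 1)))) PySem.Dict.empty).contains (String.ofList (PySem.List.slice gl (some i) (some (i + 2)))) then ((if d.contains (String.ofList (PySem.List.slice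 gl (some i) (some (i + 1)))) then d else d.insert (String.ofList (PySem.List.slice gl (some i) (some (i + 1)))) PySem.Dict.empty).getD (String.ofList (PySem.List.slice gl (some i) (some (i + 1)))) PySem.Dict.empty) else ((if d.contains (String.ofList (PySem.List.slice gl (some i) (some (i + 1)))) then d else d.insert (String.ofList (PySem.List.slice gl (some i) (some (i + 1)))) PySem.Dict.empty).getD (String.ofList (PySem.List.slice gl (some i) (some (i + 1)))) PySem.Dict.empty).insert (String.ofList (PySem.List.slice gl (some i) (some (i + 2)))) 0).modify (String.ofList (PySem.List.slice gl (some i) (some (i + 2)))) 0 (· + 1)))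
    = (fun d i => d.modify (String.ofList (PySem.List.slice gl (some i) (some (i + 1)))) PySem.Dict.empty
        (fun inner => inner.modify (String.ofList (PySem.List.slice gl (some i) (some (i + 2)))) 0 (· + 1))) := by
    funext d i
    exact stepA_eq d _ _
  rw [h1]
  rw [(List.foldl_map
    (f := fun (i : Int) => (String.ofList (PySem.List.slice gl (some i) (some (i + 1))), String.ofList (PySem.List.slice gl (some i) (some (i + 2)))))
    (g := fun (d : PySem.Dict String (PySem.Dict String Int)) (q : String × String) =>
      d.modify q.1 PySem.Dict.empty (fun inner => inner.modify q.2 0 (· + 1)))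
    (l := PySem.List.pyRange 0 ((gl.length : Int) - 1) 1)
    (init := (PySem.Dict.empty : PySem.Dict String (PySem.Dict String Int)))).symm]
  rw [slices_eq gl]
  rw [List.foldl_map, List.foldl_map]
  have h2 : (fun (d : PySem.Dict String (PySem.Dict String Int)) (ab : Char × Char) =>
      d.modify (String.ofList [ab.1]) PySem.Dict.empty
        (fun inner => inner.modify (String.ofList [ab.1, ab.2]) 0 (· + 1)))
    = (fun d ab => d.modify (pvKey (String.ofList [ab.1, ab.2])) PySem.Dict.empty
        (fun inner => inner.modify (String.ofList [ab.1, ab.2]) 0 (· + 1))) := by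
    funext d ab
    rw [pvKey_pair]
  rw [h2]

theorem items_nest (P : List String) :
    (pvNest P).items.map (fun q => (q.1, q.2.items))
      = (PySem.Set.ofList (P.map pvKey)).map
          (fun f => (f, (PySem.Dict.counter P).items.filter (fun pc => pvKey pc.1 == f))) := by
  have hkeys : (pvNest P).keys = PySem.Set.ofList (P.map pvKey) := by
    unfold pvNest
    rw [PySem.Dict.keys_foldl_modify_key P pvKey PySem.Dict.empty
      (fun _ p inner => inner.modify p 0 (· + 1)) PySem.Dict.empty]
    rfl
  have hnodup : (pvNest P).keys.Nodup := by
    unfold pvNest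
    exact PySem.Dict.nodup_keys_foldl_modify_key P pvKey PySem.Dict.empty
      (fun _ p inner => inner.modify p 0 (· + 1)) PySem.Dict.empty List.nodup_nil
  rw [items_eq_map_keys (pvNest P) PySem.Dict.empty hnodup, hkeys, List.map_map]
  apply List.map_congr_left
  intro f hf
  simp only [Function.comp]
  congr 1
  have hgetD : (pvNest P).getD f PySem.Dict.empty
      = PySem.Dict.counter (P.filter (fun p => pvKey p == f)) := by
    unfold pvNest
    rw [getD_foldl_modify_key P pvKey PySem.Dict.empty
      (fun p inner => inner.modify p 0 (· + 1)) PySem.Dict.empty f]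
    rw [PySem.Dict.counter_eq_foldl]
    rfl
  rw [hgetD, counter_items]
  rw [counter_items P, List.filter_map]
  have hcomp : ((fun pc => pvKey (Prod.fst pc) == f) ∘ (fun p => (p, (List.count p P : Int))))
      = fun p => pvKey p == f := by
    funext p; rfl
  rw [hcomp]
  rw [dedup_filter]
  apply List.map_congr_left
  intro p hp
  have hq : (pvKey p == f) = true := (List.mem_filter.1 hp).2
  have h2 : (List.filter (fun q => pvKey q == f) P).count p = P.count p := List.count_filter hq
  simp only [List.count] at h2 ⊢
  rw [h2]

theorem B_eq (genom : String) :
    get_base_pairs_alt genom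
      = (PySem.Set.ofList ((pvPairs genom.toList).map pvKey)).map
          (fun f => (f, (PySem.Dict.counter (pvPairs genom.toList)).items.filter
            (fun pc => pvKey pc.1 == f))) := by
  unfold get_base_pairs_alt pvPairs
  show (PySem.List.dedup ((((genom.toList.zip genom.toList.tail)).map
        (fun ab => String.ofList [ab.1, ab.2])).map (fun p => String.ofList (p.toList.take 1)))).map
      (fun f => (f, (List.foldl (fun (c : PySem.Dict String Int) p => c.modify p 0 (· + 1))
          PySem.Dict.empty ((genom.toList.zip genom.toList.tail).map
            (fun ab => String.ofList [ab.1, ab.2]))).items.filter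
        (fun pc => String.ofList (pc.1.toList.take 1) == f)))
    = _
  rw [PySem.List.dedup_eq_ofList, ← PySem.Dict.counter_eq_foldl]
  rfl


-- ===== VERDICT (by name: the statement is the Claim_ definition above) =====
theorem get_base_pairs_spec : Claim_equal_get_base_pairs := by
  intro genom _
  unfold Spec_get_base_pairs
  rw [A_eq_nest, items_nest, B_eq]
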